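-- pv_equiv track=rewrite | github.com/nokia/ice-support-pkg | HealthChecks/flows/Ncs/ncs_validations.py | validate_vrrp_state
-- ===== SOURCE A (Python) =====
-- def validate_vrrp_state(group_json):
--     states = []
--     for entry in group_json.get("status", {}).get("vrrpState", []):
--         state = entry.get("state")
--         if state:
--             states.append(state)
--
--     TOTAL_STATE_COUNT = len(states)
--     ACTIVE_COUNT = states.count("ACTIVE")
--     STANDBY_COUNT = states.count("STANDBY")
--     UNKNOWN_COUNT = states.count("UNKNOWN")
--
--     # 1.  Single-Node Case
--     if TOTAL_STATE_COUNT == 1: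
--         return ACTIVE_COUNT == 1
--
--     # 2.  Multi-Node Case
--     if TOTAL_STATE_COUNT > 1:
--         # Split Brain (All Active) , bad
--         if ACTIVE_COUNT == TOTAL_STATE_COUNT:
--             return False
--
--         # all standby, bad
--         if STANDBY_COUNT == TOTAL_STATE_COUNT:
--             return False
--
--         # all unknown, bad
--         if UNKNOWN_COUNT == TOTAL_STATE_COUNT:
--             return False
--
--         # GOOD state
--         if ACTIVE_COUNT == 1 and STANDBY_COUNT == (TOTAL_STATE_COUNT - ACTIVE_COUNT):
--             return True
--
--     return False
-- ===== SOURCE B (Python) =====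
-- def validate_vrrp_state(group_json):
--     # Early-exit scan: valid iff exactly one ACTIVE and every other truthy state is STANDBY.
--     seen_active = False
--     for entry in group_json.get("status", {}).get("vrrpState", []):
--         state = entry.get("state")
--         if not state:
--             continue
--         if state == "ACTIVE":
--             if seen_active:
--                 return False
--             seen_active = True
--         elif state != "STANDBY":
--             return False
--     return seen_active
-- ===== Notes on version B (the rewrite author's own statement) =====
-- stated objective: simpler
-- what changed: Replaces A's build-a-states-list plus three count() passes plus six-branch case analysis with a single early-exit scan carrying only a seen_active flag: bail out False on a second ACTIVE or any non-STANDBY other state, finally return seen_active; no list and no counters are ever built.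
import Mathlib
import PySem

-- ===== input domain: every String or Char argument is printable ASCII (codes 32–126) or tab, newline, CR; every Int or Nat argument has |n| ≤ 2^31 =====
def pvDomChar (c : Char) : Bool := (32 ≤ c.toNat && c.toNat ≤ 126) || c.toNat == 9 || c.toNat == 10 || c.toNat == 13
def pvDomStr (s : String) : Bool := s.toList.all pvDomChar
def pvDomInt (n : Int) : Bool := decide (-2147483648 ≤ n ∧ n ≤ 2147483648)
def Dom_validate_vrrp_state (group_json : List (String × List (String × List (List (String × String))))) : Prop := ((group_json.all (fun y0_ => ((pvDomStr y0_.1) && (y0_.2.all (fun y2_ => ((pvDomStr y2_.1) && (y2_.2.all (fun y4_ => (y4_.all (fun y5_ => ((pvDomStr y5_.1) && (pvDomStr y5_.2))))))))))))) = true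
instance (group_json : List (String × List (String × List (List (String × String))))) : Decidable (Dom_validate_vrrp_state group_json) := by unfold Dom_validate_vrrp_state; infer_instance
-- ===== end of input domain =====

-- B replaces A's build-a-list, three count() passes and six-branch case analysis with one
-- early-exit scan carrying a single seen_active flag (objective: simpler).

-- ===== PORT A =====
-- the `for entry in …: state = entry.get("state"); if state: states.append(state)` loop
def pvAStatesLoop (entries : List (List (String × String))) (states : List String) : List String :=
  match entries with
  | [] => states
  | e :: rest =>
    match PySem.Dict.get? ⟨e⟩ "state" with
    | none => pvAStatesLoop rest states
    | some s => if s = "" then pvAStatesLoop rest states else pvAStatesLoop rest (states ++ [s])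

def validate_vrrp_state (group_json : List (String × List (String × List (List (String × String))))) : Bool :=
  let states := pvAStatesLoop (PySem.Dict.getD ⟨PySem.Dict.getD ⟨group_json⟩ "status" []⟩ "vrrpState" []) []
  let TOTAL_STATE_COUNT := states.length
  let ACTIVE_COUNT := PySem.List.count states "ACTIVE"
  let STANDBY_COUNT := PySem.List.count states "STANDBY"
  let UNKNOWN_COUNT := PySem.List.count states "UNKNOWN"
  if TOTAL_STATE_COUNT = 1 then decide (ACTIVE_COUNT = 1)
  else if TOTAL_STATE_COUNT > 1 then
    if ACTIVE_COUNT = TOTAL_STATE_COUNT then false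
    else if STANDBY_COUNT = TOTAL_STATE_COUNT then false
    else if UNKNOWN_COUNT = TOTAL_STATE_COUNT then false
    else if ACTIVE_COUNT = 1 ∧ STANDBY_COUNT = TOTAL_STATE_COUNT - ACTIVE_COUNT then true
    else false
  else false

-- ===== PORT B =====
-- Source B's early-exit for-loop: `return False` inside the loop becomes the recursion stopping with false
def pvBScan (entries : List (List (String × String))) (seen_active : Bool) : Bool :=
  match entries with
  | [] => seen_active
  | e :: rest =>
    match PySem.Dict.get? ⟨e⟩ "state" with
    | none => pvBScan rest seen_active          -- `if not state: continue` (key missing)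
    | some s =>
      if s = "" then pvBScan rest seen_active   -- `if not state: continue` (empty string)
      else if s = "ACTIVE" then
        if seen_active then false else pvBScan rest true
      else if s ≠ "STANDBY" then false
      else pvBScan rest seen_active

def validate_vrrp_state_alt (group_json : List (String × List (String × List (List (String × String))))) : Bool :=
  pvBScan (PySem.Dict.getD ⟨PySem.Dict.getD ⟨group_json⟩ "status" []⟩ "vrrpState" []) false

-- ===== PRECONDITION & SPEC =====
def Spec_validate_vrrp_state (group_json : List (String × List (String × List (List (String × String))))) (out : Bool) : Prop := out = validate_vrrp_state_alt group_json
instance (group_json : List (String × List (String × List (List (String × String))))) (out : Bool) : Decidable (Spec_validate_vrrp_state group_json out) := by unfold Spec_validate_vrrp_state; infer_instance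

-- ===== CLAIM (what is proved, stated in full; the proofs are below) =====
def Claim_equal_validate_vrrp_state : Prop := ∀ (group_json : List (String × List (String × List (List (String × String))))), Dom_validate_vrrp_state group_json → Spec_validate_vrrp_state group_json (validate_vrrp_state group_json)

-- ===== LEMMAS AND PROOFS =====

-- the truthy state of one entry (none = missing or falsy), and the truthy states of all entries
def pvTake (e : List (String × String)) : Option String :=
  match PySem.Dict.get? ⟨e⟩ "state" with
  | none => none
  | some s => if s = "" then none else some s

def pvStates (entries : List (List (String × String))) : List String :=
  entries.filterMap pvTake

theorem pvAStatesLoop_eq (entries : List (List (String × String))) (states : List String) :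
    pvAStatesLoop entries states = states ++ pvStates entries := by
  induction entries generalizing states with
  | nil => simp [pvAStatesLoop, pvStates]
  | cons e rest ih =>
    simp only [pvAStatesLoop, pvStates, List.filterMap_cons]
    cases h : PySem.Dict.get? ⟨e⟩ "state" with
    | none => simpa [pvStates, pvTake, h] using ih states
    | some s =>
      by_cases hs : s = "" <;> simp [hs, pvStates, pvTake, h, ih]

-- characterisation of the early-exit scan by the counts of the truthy states
theorem pvBScan_cons (e : List (String × String)) (rest : List (List (String × String))) (seen : Bool) :
    pvBScan (e :: rest) seen =
      (match pvTake e with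
       | none => pvBScan rest seen
       | some s =>
         if s = "ACTIVE" then (if seen then false else pvBScan rest true)
         else if s ≠ "STANDBY" then false
         else pvBScan rest seen) := by
  simp only [pvBScan, pvTake]
  cases h : PySem.Dict.get? ⟨e⟩ "state" with
  | none => rfl
  | some s =>
    by_cases hs : s = ""
    · simp [hs]
    · by_cases hA : s = "ACTIVE" <;> simp [hs, hA]

theorem pvBScan_eq (entries : List (List (String × String))) (seen : Bool) :
    pvBScan entries seen =
      decide ((pvStates entries).count "ACTIVE" = (if seen then 0 else 1) ∧
              ∀ s ∈ pvStates entries, s = "ACTIVE" ∨ s = "STANDBY") := by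
  induction entries generalizing seen with
  | nil => cases seen <;> simp [pvBScan, pvStates]
  | cons e rest ih =>
    rw [pvBScan_cons]
    cases h : pvTake e with
    | none => simp only [pvStates, List.filterMap_cons, h]; exact ih seen
    | some s =>
      simp only [pvStates, List.filterMap_cons, h]
      by_cases hA : s = "ACTIVE"
      · cases seen with
        | false =>
          simp only [hA, reduceIte, Bool.false_eq_true, ite_false]
          rw [ih true]
          simp only [decide_eq_decide]
          simp [pvStates]
        | true =>
          simp [hA]
      · by_cases hS : s = "STANDBY"
        · simp only [hS]
          rw [ih seen]
          simp [pvStates]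
          congr 1
          simp [decide_eq_decide]
        · simp [hA, hS]

theorem pvCountAS_le (l : List String) :
    l.count "ACTIVE" + l.count "STANDBY" ≤ l.length := by
  induction l with
  | nil => simp
  | cons x xs ih =>
    simp only [List.count_cons, List.length_cons]
    by_cases h1 : x = "ACTIVE" <;> by_cases h2 : x = "STANDBY" <;> simp_all <;> omega

theorem pvAllAS_iff (L : List String) :
    (∀ s ∈ L, s = "ACTIVE" ∨ s = "STANDBY") ↔
      L.count "ACTIVE" + L.count "STANDBY" = L.length := by
  induction L with
  | nil => simp
  | cons x xs ih =>
    have hAS := pvCountAS_le xs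
    simp only [List.mem_cons, List.count_cons, List.length_cons, forall_eq_or_imp]
    by_cases h1 : x = "ACTIVE" <;> by_cases h2 : x = "STANDBY" <;>
      simp_all <;> omega

theorem pvCounts_le (l : List String) :
    l.count "ACTIVE" + l.count "STANDBY" + l.count "UNKNOWN" ≤ l.length := by
  induction l with
  | nil => simp
  | cons x xs ih =>
    simp only [List.count_cons, List.length_cons]
    by_cases h1 : x = "ACTIVE" <;> by_cases h2 : x = "STANDBY" <;> by_cases h3 : x = "UNKNOWN" <;>
      simp_all <;> omega

-- ===== VERDICT (by name: the statement is the Claim_ definition above) =====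
theorem validate_vrrp_state_spec : Claim_equal_validate_vrrp_state := by
  intro gj _
  unfold Spec_validate_vrrp_state validate_vrrp_state validate_vrrp_state_alt
  rw [pvAStatesLoop_eq, pvBScan_eq]
  simp only [List.nil_append, PySem.List.count, Bool.false_eq_true, ite_false]
  set L := pvStates (PySem.Dict.getD ⟨PySem.Dict.getD ⟨gj⟩ "status" []⟩ "vrrpState" []) with hL
  have hle := pvCounts_le L
  have hA := List.count_le_length (l := L) (a := "ACTIVE")
  have hS := List.count_le_length (l := L) (a := "STANDBY")
  have hall := pvAllAS_iff L
  by_cases h1 : L.length = 1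
  · by_cases hc : L.count "ACTIVE" = 1
    · have hcs : L.count "ACTIVE" + L.count "STANDBY" = L.length := by omega
      simp [h1, hc]
      exact hall.mpr hcs
    · simp [h1, hc]
  · rw [if_neg h1]
    by_cases h2 : L.length > 1
    · rw [if_pos h2]
      by_cases hAT : L.count "ACTIVE" = L.length
      · rw [if_pos hAT]
        have : ¬ (L.count "ACTIVE" = 1 ∧ ∀ s ∈ L, s = "ACTIVE" ∨ s = "STANDBY") := by
          rintro ⟨x, y⟩; have := hall.mp y; omega
        exact (decide_eq_false this).symm
      · rw [if_neg hAT]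
        by_cases hST : L.count "STANDBY" = L.length
        · rw [if_pos hST]
          have : ¬ (L.count "ACTIVE" = 1 ∧ ∀ s ∈ L, s = "ACTIVE" ∨ s = "STANDBY") := by
            rintro ⟨x, y⟩; have := hall.mp y; omega
          exact (decide_eq_false this).symm
        · rw [if_neg hST]
          by_cases hUT : L.count "UNKNOWN" = L.length
          · rw [if_pos hUT]
            have : ¬ (L.count "ACTIVE" = 1 ∧ ∀ s ∈ L, s = "ACTIVE" ∨ s = "STANDBY") := by
              rintro ⟨x, y⟩; have := hall.mp y; omega
            exact (decide_eq_false this).symm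
          · rw [if_neg hUT]
            by_cases hgood : L.count "ACTIVE" = 1 ∧ L.count "STANDBY" = L.length - L.count "ACTIVE"
            · rw [if_pos hgood]
              have : L.count "ACTIVE" = 1 ∧ ∀ s ∈ L, s = "ACTIVE" ∨ s = "STANDBY" := by
                obtain ⟨x, y⟩ := hgood
                exact ⟨x, hall.mpr (by omega)⟩
              exact (decide_eq_true this).symm
            · rw [if_neg hgood]
              have : ¬ (L.count "ACTIVE" = 1 ∧ ∀ s ∈ L, s = "ACTIVE" ∨ s = "STANDBY") := by
                rintro ⟨x, y⟩; have := hall.mp y; exact hgood ⟨x, by omega⟩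
              exact (decide_eq_false this).symm
    · have hL0 : L.length = 0 := by omega
      rw [if_neg h2]
      have : ¬ (L.count "ACTIVE" = 1 ∧ ∀ s ∈ L, s = "ACTIVE" ∨ s = "STANDBY") := by
        rintro ⟨x, _⟩; omega
      exact (decide_eq_false this).symm
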